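-- pv_equiv track=rewrite | github.com/pypi-data/pypi-mirror-330 | packages/CIMA/cima-1.0.6.tar.gz/cima-1.0.6/src/CIMA/utils/WritePDB.py | _encode_pure
-- ===== SOURCE A (Python) =====
-- def _encode_pure(digits, value):
--   "encodes value using the given digits"
--   assert value >= 0
--   if (value == 0): return digits[0]
--   n = len(digits)
--   result = []
--   while (value != 0):
--     rest = value // n
--     result.append(digits[value - rest * n])
--     value = rest
--   result.reverse()
--   return "".join(result)
-- ===== SOURCE B (Python) =====
-- def _encode_pure(digits, value):
--     "encodes value using the given digits"
--     assert value >= 0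
--     if value == 0:
--         return digits[0]
--     n = len(digits)
--     p = 1
--     while p * n <= value:
--         p *= n
--     out = ""
--     while p > 0:
--         out += digits[(value // p) % n]
--         p //= n
--     return out
-- ===== Notes on version B (the rewrite author's own statement) =====
-- stated objective: alternative
-- what changed: Instead of collecting least-significant digits in a list and reversing, B first finds the largest power p of the base with p*n <= value and then emits digits most-significant-first by dividing by descending powers.
import Mathlib
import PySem

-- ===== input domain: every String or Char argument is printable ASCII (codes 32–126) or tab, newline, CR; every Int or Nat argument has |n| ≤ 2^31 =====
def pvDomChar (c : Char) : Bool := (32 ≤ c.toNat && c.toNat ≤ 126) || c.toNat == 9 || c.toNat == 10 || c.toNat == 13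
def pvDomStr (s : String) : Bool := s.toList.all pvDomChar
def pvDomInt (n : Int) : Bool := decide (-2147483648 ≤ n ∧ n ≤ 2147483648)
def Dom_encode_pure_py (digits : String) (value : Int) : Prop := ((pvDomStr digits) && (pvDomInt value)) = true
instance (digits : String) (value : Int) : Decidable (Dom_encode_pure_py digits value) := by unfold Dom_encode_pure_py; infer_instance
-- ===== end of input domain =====

-- B replaces A's LSB-first digit-list accumulation + reverse() by a different algorithm:
-- it first finds the largest power p of the base with p*n <= value, then emits digits
-- most-significant-first by p-descending division (alternative decomposition, same cost).


-- ===== PORT A =====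
-- A's while loop: append digits[value - rest*n] LSB-first, then reverse.
-- fuel is only a totality guard (Python diverges when n ≤ 1 and value > 0; excluded by Pre_);
-- the default in pyGetD is never reached under Pre_ (the index is value % n, in range).
def encodeLoopA (ds : List Char) (n : Int) : Nat → Int → List Char → List Char
  | 0, _, acc => acc
  | fuel + 1, value, acc =>
    if value ≠ 0 then
      let rest := PySem.Int.floordiv value n
      encodeLoopA ds n fuel rest (acc ++ [PySem.List.pyGetD ds (value - rest * n) ' '])
    else acc

def encode_pure_py (digits : String) (value : Int) : String :=
  if value = 0 then String.ofList [PySem.List.pyGetD digits.toList 0 ' ']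
  else
    let n : Int := (digits.toList.length : Int)
    String.ofList ((encodeLoopA digits.toList n (value.toNat + 1) value []).reverse)

-- ===== PORT B =====
-- B's first loop: p = 1; while p * n <= value: p *= n.  (fuel = totality guard only)
def findPowB (n v : Int) : Nat → Int → Int
  | 0, p => p
  | fuel + 1, p => if p * n ≤ v then findPowB n v fuel (p * n) else p

-- B's second loop: while p > 0: out += digits[(value // p) % n]; p //= n.
def emitB (ds : List Char) (n v : Int) : Nat → Int → List Char
  | 0, _ => []
  | fuel + 1, p =>
    if 0 < p then
      PySem.List.pyGetD ds (PySem.Int.mod (PySem.Int.floordiv v p) n) ' '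
        :: emitB ds n v fuel (PySem.Int.floordiv p n)
    else []

def encode_pure_py_alt (digits : String) (value : Int) : String :=
  if value = 0 then String.ofList [PySem.List.pyGetD digits.toList 0 ' ']
  else
    let n : Int := (digits.toList.length : Int)
    let p : Int := findPowB n value (value.toNat + 1) 1
    String.ofList (emitB digits.toList n value (value.toNat + 1) p)

-- ===== PRECONDITION & SPEC =====
-- Pre_ excludes: value < 0 (A's assert raises), empty digits (IndexError), and
-- value > 0 with a single digit (A's while loop never terminates there).
def Pre_encode_pure_py (digits : String) (value : Int) : Prop :=
  0 ≤ value ∧ 1 ≤ digits.toList.length ∧ (value ≠ 0 → 2 ≤ digits.toList.length)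
instance (digits : String) (value : Int) : Decidable (Pre_encode_pure_py digits value) := by
  unfold Pre_encode_pure_py; infer_instance

def pvWitness_encode_pure_py : String × Int := ("01", 5)

def Spec_encode_pure_py (digits : String) (value : Int) (out : String) : Prop := out = encode_pure_py_alt digits value
instance (digits : String) (value : Int) (out : String) : Decidable (Spec_encode_pure_py digits value out) := by unfold Spec_encode_pure_py; infer_instance

-- ===== CLAIM (what is proved, stated in full; the proofs are below) =====
def Claim_equal_encode_pure_py : Prop := ∀ (digits : String) (value : Int), Dom_encode_pure_py digits value → Pre_encode_pure_py digits value → Spec_encode_pure_py digits value (encode_pure_py digits value)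

-- ===== LEMMAS AND PROOFS =====

-- Proof-only intermediate: the MSB-first digit list, by recursion on the value.
def encM (ds : List Char) (n : Int) : Nat → Int → List Char
  | 0, _ => []
  | fuel + 1, v =>
    if v = 0 then []
    else encM ds n fuel (PySem.Int.floordiv v n) ++ [PySem.List.pyGetD ds (PySem.Int.mod v n) ' ']

-- A's loop, reversed, is encM followed by the reversed accumulator.
lemma loopA_reverse_eq (ds : List Char) (n : Int) :
    ∀ (fuel : Nat) (v : Int) (acc : List Char),
      (encodeLoopA ds n fuel v acc).reverse = encM ds n fuel v ++ acc.reverse := by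
  intro fuel
  induction fuel with
  | zero => intro v acc; simp [encodeLoopA, encM]
  | succ f ih =>
    intro v acc
    by_cases hv : v = 0
    · simp [encodeLoopA, encM, hv]
    · have hdig : v - PySem.Int.floordiv v n * n = PySem.Int.mod v n := by
        have := PySem.Int.floordiv_mul_add_mod v n
        omega
      simp only [encodeLoopA, encM, hv, if_pos, if_neg, ne_eq, not_false_eq_true]
      rw [ih, hdig]
      simp

lemma emitB_p_zero (ds : List Char) (n v : Int) (f : Nat) : emitB ds n v f 0 = [] := by
  cases f <;> simp [emitB]

lemma floordiv_one_pos (n : Int) (hn : 2 ≤ n) : PySem.Int.floordiv 1 n = 0 := by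
  rw [PySem.Int.floordiv_eq_ediv_of_pos (by omega)]
  exact Int.ediv_eq_zero_of_lt (by omega) (by omega)

lemma floordiv_pow_succ (n : Int) (hn : 2 ≤ n) (k : Nat) :
    PySem.Int.floordiv (n ^ (k + 1)) n = n ^ k := by
  rw [PySem.Int.floordiv_eq_ediv_of_pos (by omega), pow_succ]
  exact Int.mul_ediv_cancel _ (by omega)

-- fuel normalization for emitB at p = n^k
lemma emitB_fuel (ds : List Char) (n v : Int) (hn : 2 ≤ n) :
    ∀ (k f : Nat), k < f → emitB ds n v f (n ^ k) = emitB ds n v (k + 1) (n ^ k) := by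
  intro k
  induction k with
  | zero =>
    intro f hf
    obtain ⟨f', rfl⟩ : ∃ f', f = f' + 1 := ⟨f - 1, by omega⟩
    simp [emitB, floordiv_one_pos n hn, emitB_p_zero]
  | succ k ih =>
    intro f hf
    obtain ⟨f', rfl⟩ : ∃ f', f = f' + 1 := ⟨f - 1, by omega⟩
    have hp : (0:Int) < n ^ (k+1) := pow_pos (by omega) _
    simp only [emitB, hp, if_pos, floordiv_pow_succ n hn k]
    rw [ih f' (by omega)]
    simp only [emitB]

-- bridge: the least-significant digit peels off at the end
lemma emitB_bridge (ds : List Char) (n : Int) (hn : 2 ≤ n) :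
    ∀ (k : Nat) (v : Int), 0 ≤ v →
      emitB ds n v (k + 2) (n ^ (k + 1)) =
        emitB ds n (PySem.Int.floordiv v n) (k + 1) (n ^ k)
          ++ [PySem.List.pyGetD ds (PySem.Int.mod v n) ' '] := by
  intro k
  induction k with
  | zero =>
    intro v hv
    have h1 : PySem.Int.floordiv n n = 1 := by
      rw [PySem.Int.floordiv_eq_ediv_of_pos (by omega)]
      exact Int.ediv_self (by omega)
    have h2 : PySem.Int.floordiv v 1 = v := by
      rw [PySem.Int.floordiv_eq_ediv_of_pos (by omega)]; exact Int.ediv_one v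
    have h3 : PySem.Int.floordiv (PySem.Int.floordiv v n) 1 = PySem.Int.floordiv v n := by
      rw [PySem.Int.floordiv_eq_ediv_of_pos (by omega)]; exact Int.ediv_one _
    have hnpos : (0:Int) < n := by omega
    have hnn : n / n = (1:Int) := Int.ediv_self (by omega)
    simp [emitB, hnpos, pow_succ, hnn]
  | succ k ih =>
    intro v hv
    have hnpos : (0:Int) < n := by omega
    have hp : (0:Int) < n ^ (k + 2) := pow_pos hnpos _
    have hp1 : (0:Int) < n ^ (k + 1) := pow_pos hnpos _
    have hfd : PySem.Int.floordiv (n ^ (k + 2)) n = n ^ (k + 1) := floordiv_pow_succ n hn (k + 1)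
    have hdd : PySem.Int.floordiv v n / n ^ (k + 1) = PySem.Int.floordiv v (n ^ (k + 2)) := by
      rw [PySem.Int.floordiv_eq_ediv_of_pos hnpos, PySem.Int.floordiv_eq_ediv_of_pos hp,
          Int.ediv_ediv_of_nonneg (show (0:Int) ≤ n by omega), ← pow_succ']
    have lhs : emitB ds n v (k + 1 + 2) (n ^ (k + 1 + 1)) =
        PySem.List.pyGetD ds (PySem.Int.mod (PySem.Int.floordiv v (n ^ (k + 2))) n) ' '
          :: emitB ds n v (k + 2) (n ^ (k + 1)) := by
      simp [emitB, hp, hfd]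
    have rhs : emitB ds n (PySem.Int.floordiv v n) (k + 1 + 1) (n ^ (k + 1)) =
        PySem.List.pyGetD ds (PySem.Int.mod (PySem.Int.floordiv v (n ^ (k + 2))) n) ' '
          :: emitB ds n (PySem.Int.floordiv v n) (k + 1) (n ^ k) := by
      simp [emitB, hp1, floordiv_pow_succ n hn k, hdd]
    rw [lhs, rhs, ih v hv]
    simp

-- emitB at the exact power window equals encM
lemma emitB_eq_encM (ds : List Char) (n : Int) (hn : 2 ≤ n) :
    ∀ (k : Nat) (v : Int), n ^ k ≤ v → v < n ^ (k + 1) →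
      emitB ds n v (k + 1) (n ^ k) = encM ds n (k + 1) v := by
  intro k
  induction k with
  | zero =>
    intro v h1 h2
    have hv0 : v ≠ 0 := by simp at h1; omega
    simp [emitB, encM, hv0]
  | succ k ih =>
    intro v h1 h2
    have hnpos : (0:Int) < n := by omega
    have hppos : (0:Int) < n ^ (k + 1) := pow_pos hnpos _
    have hv0 : v ≠ 0 := by nlinarith
    have hvnn : (0:Int) ≤ v := le_trans (le_of_lt hppos) h1
    have hlow : n ^ k ≤ PySem.Int.floordiv v n := by
      rw [PySem.Int.le_floordiv_iff_mul_le hnpos]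
      calc n ^ k * n = n ^ (k + 1) := (pow_succ n k).symm
        _ ≤ v := h1
    have hhigh : PySem.Int.floordiv v n < n ^ (k + 1) := by
      rw [PySem.Int.floordiv_lt_iff_lt_mul hnpos]
      calc v < n ^ (k + 2) := h2
        _ = n ^ (k + 1) * n := pow_succ n (k + 1)
    rw [emitB_bridge ds n hn k v hvnn, ih _ hlow hhigh]
    have : encM ds n (k + 1 + 1) v
        = encM ds n (k + 1) (PySem.Int.floordiv v n) ++ [PySem.List.pyGetD ds (PySem.Int.mod v n) ' '] := by
      simp [encM, hv0]
    rw [this]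

-- encM fuel irrelevance: any fuel beyond the digit count gives the same list
lemma encM_fuel (ds : List Char) (n : Int) (hn : 2 ≤ n) :
    ∀ (f g : Nat) (v : Int), 0 ≤ v → v < n ^ f → v < n ^ g →
      encM ds n f v = encM ds n g v := by
  intro f
  induction f with
  | zero =>
    intro g v hv h1 _
    have hv0 : v = 0 := by simp at h1; omega
    cases g <;> simp [encM, hv0]
  | succ f ih =>
    intro g v hv h1 h2
    by_cases hv0 : v = 0
    · cases g <;> simp [encM, hv0]
    · obtain ⟨g', rfl⟩ : ∃ g', g = g' + 1 := by
        cases g with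
        | zero => exact absurd h2 (by simp; omega)
        | succ g' => exact ⟨g', rfl⟩
      have hq := PySem.Int.floordiv_mul_add_mod v n
      have hmod : 0 ≤ PySem.Int.mod v n ∧ PySem.Int.mod v n < n := by
        constructor
        · rw [PySem.Int.mod_eq_emod_of_pos (by omega)]; exact Int.emod_nonneg v (by omega)
        · rw [PySem.Int.mod_eq_emod_of_pos (by omega)]; exact Int.emod_lt_of_pos v (by omega)
      have hqnn : 0 ≤ PySem.Int.floordiv v n := by
        by_contra h
        push Not at h
        have hle : PySem.Int.floordiv v n * n ≤ -1 * n :=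
          mul_le_mul_of_nonneg_right (by omega) (by omega)
        linarith [hq, hmod.1, hmod.2, hle, hv]
      have hq1 : PySem.Int.floordiv v n < n ^ f := by
        rw [PySem.Int.floordiv_lt_iff_lt_mul (by omega)]
        calc v < n ^ (f + 1) := h1
          _ = n ^ f * n := pow_succ n f
      have hq2 : PySem.Int.floordiv v n < n ^ g' := by
        rw [PySem.Int.floordiv_lt_iff_lt_mul (by omega)]
        calc v < n ^ (g' + 1) := h2
          _ = n ^ g' * n := pow_succ n g'
      simp only [encM, hv0, ite_false]
      rw [ih g' (PySem.Int.floordiv v n) hqnn hq1 hq2]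

-- findPowB returns the largest power of n not exceeding v
lemma findPowB_spec (n v : Int) :
    ∀ (f j : Nat), n ^ j ≤ v → v < n ^ (j + f) →
      ∃ k, findPowB n v f (n ^ j) = n ^ k ∧ n ^ k ≤ v ∧ v < n ^ (k + 1) := by
  intro f
  induction f with
  | zero => intro j h1 h2; exact absurd h1 (by simpa using h2)
  | succ f ih =>
    intro j h1 h2
    by_cases h : n ^ j * n ≤ v
    · have : findPowB n v (f + 1) (n ^ j) = findPowB n v f (n ^ (j + 1)) := by
        simp [findPowB, h, pow_succ]
      rw [this]
      exact ih (j + 1) (by rw [pow_succ]; exact h) (by rw [show j + 1 + f = j + (f + 1) by omega]; exact h2)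
    · refine ⟨j, by simp [findPowB, h], h1, ?_⟩
      rw [pow_succ]; omega

theorem encode_pure_py_spec : Claim_equal_encode_pure_py := by
  intro digits value _ hpre
  obtain ⟨hv, hlen, hlen2⟩ := hpre
  unfold Spec_encode_pure_py encode_pure_py encode_pure_py_alt
  by_cases hv0 : value = 0
  · simp [hv0]
  · have hn : 2 ≤ (digits.toList.length : Int) := by exact_mod_cast hlen2 hv0
    set ds := digits.toList
    set n : Int := (ds.length : Int) with hndef
    have hv1 : 1 ≤ value := by omega
    -- findPowB starting from 1 = n^0
    have hstart : (n : Int) ^ 0 ≤ value := by simpa using hv1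
    have hbig : value < n ^ (0 + (value.toNat + 1)) := by
      have h2p : ((value.toNat : Int)) < 2 ^ (value.toNat + 1) := by
        have := Nat.lt_two_pow_self (n := value.toNat)
        have h' : value.toNat < 2 ^ (value.toNat + 1) := lt_of_lt_of_le this (Nat.pow_le_pow_right (by omega) (by omega))
        exact_mod_cast h'
      have hle : (2:Int) ^ (value.toNat + 1) ≤ n ^ (value.toNat + 1) :=
        pow_le_pow_left₀ (by omega) (by omega) _
      have hvt : value = (value.toNat : Int) := (Int.toNat_of_nonneg hv).symm
      rw [zero_add]
      omega
    obtain ⟨k, hfp, hk1, hk2⟩ := findPowB_spec n value (value.toNat + 1) 0 hstart hbig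
    have hkle : k < value.toNat + 1 := by
      have h2k : (k : Int) < 2 ^ k := by exact_mod_cast Nat.lt_two_pow_self (n := k)
      have hle : (2:Int) ^ k ≤ n ^ k := pow_le_pow_left₀ (by omega) (by omega) _
      omega
    simp only [hv0, ite_false]
    rw [show (1:Int) = n ^ 0 from (pow_zero n).symm]
    rw [hfp, emitB_fuel ds n value hn k (value.toNat + 1) hkle,
        emitB_eq_encM ds n hn k value hk1 hk2,
        loopA_reverse_eq ds n (value.toNat + 1) value []]
    rw [encM_fuel ds n hn (k + 1) (value.toNat + 1) value hv hk2 (by simpa using hbig)]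
    simp
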